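-- pv_equiv track=rewrite | github.com/daavila1/CS50-solutions | cs50p/PS_5/test_plates/plates.py | get_afdgt
-- ===== SOURCE A (Python) =====
-- def get_afdgt(lst):
--     list(lst)
--     after_digit = []
--     for i in range(len(lst)):
--         if lst[i].isdigit():
--             while i < len(lst):
--                 after_digit.append(lst[i])
--                 i += 1
--             break
--     return after_digit
-- ===== SOURCE B (Python) =====
-- def get_afdgt(lst):
--     collecting = False
--     out = []
--     for x in lst:
--         if not collecting and x.isdigit():
--             collecting = True
--         if collecting:
--             out.append(x)
--     return out
-- ===== Notes on version B (the rewrite author's own statement) =====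
-- stated objective: simpler
-- what changed: Replaced the find-index-then-inner-while copy (and the dead list(lst) call) with a single flat pass carrying a boolean 'collecting' flag and an accumulator.
import Mathlib
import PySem

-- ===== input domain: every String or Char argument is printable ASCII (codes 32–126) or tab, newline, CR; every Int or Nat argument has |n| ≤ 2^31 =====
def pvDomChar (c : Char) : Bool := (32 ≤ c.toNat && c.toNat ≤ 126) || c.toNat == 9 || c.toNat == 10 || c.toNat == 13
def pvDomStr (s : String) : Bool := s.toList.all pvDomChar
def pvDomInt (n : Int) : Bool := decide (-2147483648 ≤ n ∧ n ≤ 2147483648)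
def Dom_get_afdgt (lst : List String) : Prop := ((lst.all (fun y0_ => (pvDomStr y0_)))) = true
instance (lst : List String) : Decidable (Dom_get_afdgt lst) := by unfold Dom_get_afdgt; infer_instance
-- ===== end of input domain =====

-- B replaces A's find-first-digit-index + inner while-copy (and a dead list(lst) call)
-- with a single flat pass carrying a boolean flag; objective: simpler.

-- ===== PORT A =====
-- inner 'while i < len(lst): append lst[i]; i += 1'
def get_afdgt_while (lst : List String) (i : Nat) : List String :=
  if h : i < lst.length then lst[i] :: get_afdgt_while lst (i + 1) else []
termination_by lst.length - i

-- 'for i in range(len(lst)): if lst[i].isdigit(): <while>; break'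
def get_afdgt_for (lst : List String) (i : Nat) : List String :=
  if h : i < lst.length then
    if PySem.Str.strIsdigit lst[i] then get_afdgt_while lst i
    else get_afdgt_for lst (i + 1)
  else []
termination_by lst.length - i

def get_afdgt (lst : List String) : List String :=
  get_afdgt_for lst 0

-- ===== PORT B =====
def get_afdgt_alt (lst : List String) : List String :=
  (lst.foldl (fun (s : Bool × List String) x =>
      let c := if !s.1 && PySem.Str.strIsdigit x then true else s.1
      (c, if c then s.2 ++ [x] else s.2))
    (false, [])).2

-- ===== PRECONDITION & SPEC =====
def Spec_get_afdgt (lst : List String) (out : List String) : Prop := out = get_afdgt_alt lst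
instance (lst : List String) (out : List String) : Decidable (Spec_get_afdgt lst out) := by unfold Spec_get_afdgt; infer_instance

-- ===== CLAIM (what is proved, stated in full; the proofs are below) =====
def Claim_equal_get_afdgt : Prop := ∀ (lst : List String), Dom_get_afdgt lst → Spec_get_afdgt lst (get_afdgt lst)

-- ===== LEMMAS AND PROOFS =====

-- the flag-pass step function of B
def pvStep (s : Bool × List String) (x : String) : Bool × List String :=
  let c := if !s.1 && PySem.Str.strIsdigit x then true else s.1
  (c, if c then s.2 ++ [x] else s.2)

theorem pvFoldl_true (xs : List String) (acc : List String) :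
    xs.foldl pvStep (true, acc) = (true, acc ++ xs) := by
  induction xs generalizing acc with
  | nil => simp
  | cons x t ih => simp [pvStep, ih, List.append_assoc]

theorem pvWhile_eq_drop (lst : List String) (i : Nat) :
    get_afdgt_while lst i = lst.drop i := by
  fun_induction get_afdgt_while lst i with
  | case1 i h ih =>
    rw [ih, List.drop_eq_getElem_cons h]
  | case2 i h =>
    rw [List.drop_eq_nil_of_le (by omega)]

theorem pvFor_eq_fold (lst : List String) (i : Nat) :
    get_afdgt_for lst i = ((lst.drop i).foldl pvStep (false, [])).2 := by
  fun_induction get_afdgt_for lst i with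
  | case1 i h hd =>
    rw [pvWhile_eq_drop, List.drop_eq_getElem_cons h]
    simp only [List.foldl_cons, pvStep, hd]
    simp [pvFoldl_true]
  | case2 i h hd ih =>
    rw [ih, List.drop_eq_getElem_cons h]
    simp only [Bool.not_eq_true] at hd
    simp only [List.foldl_cons, pvStep, hd, Bool.not_false, Bool.true_and,
      Bool.false_eq_true, if_false]
  | case3 i h =>
    rw [List.drop_eq_nil_of_le (by omega)]
    simp

-- ===== VERDICT (by name: the statement is the Claim_ definition above) =====
theorem get_afdgt_spec : Claim_equal_get_afdgt := by
  intro lst _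
  show get_afdgt lst = get_afdgt_alt lst
  rw [get_afdgt, pvFor_eq_fold, List.drop_zero]
  rfl
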